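-- pv_equiv track=rewrite | github.com/HayeAdX/Test | Align_param/pascalize_cpp_variables.py | collect_identifiers
-- ===== SOURCE A (Python) =====
-- from typing import Dict, List, Optional, Sequence, Set, Tuple
--
-- def collect_identifiers(text: str) -> Set[str]:
--     ids: Set[str] = set()
--     state = "code"
--     i = 0
--
--     while i < len(text):
--         ch = text[i]
--         nxt = text[i + 1] if i + 1 < len(text) else ""
--
--         if state == "code":
--             if ch == "/" and nxt == "/":
--                 state = "line_comment"
--                 i += 2
--                 continue
--             if ch == "/" and nxt == "*":
--                 state = "block_comment"
--                 i += 2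
--                 continue
--             if ch == '"':
--                 state = "string"
--                 i += 1
--                 continue
--             if ch == "'":
--                 state = "char"
--                 i += 1
--                 continue
--             if ch.isalpha() or ch == "_":
--                 j = i + 1
--                 while j < len(text) and (text[j].isalnum() or text[j] == "_"):
--                     j += 1
--                 ids.add(text[i:j])
--                 i = j
--                 continue
--
--         elif state == "line_comment":
--             if ch == "\n":
--                 state = "code"
--
--         elif state == "block_comment":
--             if ch == "*" and nxt == "/":
--                 state = "code"
--                 i += 2
--                 continue
--
--         elif state == "string":
--             if ch == "\\":
--                 i += 2
--                 continue
--             if ch == '"':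
--                 state = "code"
--
--         elif state == "char":
--             if ch == "\\":
--                 i += 2
--                 continue
--             if ch == "'":
--                 state = "code"
--
--         i += 1
--
--     return ids
-- ===== SOURCE B (Python) =====
-- def _skip_line(text, i):
--     # consume a line comment body: return index just past the newline (or len if none)
--     n = len(text)
--     while i < n and text[i] != "\n":
--         i += 1
--     return i + 1 if i < n else n
--
-- def _skip_block(text, i):
--     # consume a block comment body: return index just past '*/' (or len if unterminated)
--     n = len(text)
--     while i < n:
--         if text[i] == "*" and i + 1 < n and text[i + 1] == "/":
--             return i + 2
--         i += 1
--     return n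
--
-- def _skip_literal(text, i, quote):
--     # consume a string/char literal body, honouring backslash escapes
--     n = len(text)
--     while i < n:
--         c = text[i]
--         if c == "\\":
--             i += 2
--         elif c == quote:
--             return i + 1
--         else:
--             i += 1
--     return i
--
-- def collect_identifiers(text):
--     ids = set()
--     i, n = 0, len(text)
--     while i < n:
--         ch = text[i]
--         two = text[i:i + 2]
--         if two == "//":
--             i = _skip_line(text, i + 2)
--         elif two == "/*":
--             i = _skip_block(text, i + 2)
--         elif ch == '"' or ch == "'":
--             i = _skip_literal(text, i + 1, ch)
--         elif ch.isalpha() or ch == "_":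
--             j = i + 1
--             while j < n and (text[j].isalnum() or text[j] == "_"):
--                 j += 1
--             ids.add(text[i:j])
--             i = j
--         else:
--             i += 1
--     return ids
-- ===== Notes on version B (the rewrite author's own statement) =====
-- stated objective: simpler
-- what changed: Replaces the single loop with a mode string (5-state machine) by a plain scanner that dispatches on the next token and consumes each whole comment/literal with a dedicated helper (one shared helper for both quote kinds), so no state variable survives across iterations.
import Mathlib
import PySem

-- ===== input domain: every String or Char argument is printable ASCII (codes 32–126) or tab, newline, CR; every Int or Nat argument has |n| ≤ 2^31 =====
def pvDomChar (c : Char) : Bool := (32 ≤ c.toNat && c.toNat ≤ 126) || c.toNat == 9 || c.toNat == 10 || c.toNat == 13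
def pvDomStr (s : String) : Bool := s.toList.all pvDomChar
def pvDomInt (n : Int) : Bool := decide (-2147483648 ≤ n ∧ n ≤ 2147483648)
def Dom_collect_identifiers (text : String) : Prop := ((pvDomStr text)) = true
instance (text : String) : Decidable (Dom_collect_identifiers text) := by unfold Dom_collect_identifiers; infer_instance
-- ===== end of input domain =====

-- B replaces A's mode-string state machine by a dispatch loop with dedicated helpers that
-- consume each whole comment/literal; objective: simpler (same O(n) cost).
-- Both ports return the Python set as a PySem.Set String (list of distinct elements).

-- identifier characters (Python ch.isalpha()/isalnum(), exact on the ASCII domain)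
def identStart (c : Char) : Bool := PySem.Chars.isalpha c || c = '_'
def identCont (c : Char) : Bool := PySem.Chars.isalnum c || c = '_'

-- termination facts both ports cite by name in decreasing_by
theorem pv_tail_lt (c : Char) (cs : List Char) : cs.tail.length < (c :: cs).length := by
  cases cs <;> simp
theorem pv_drop_lt (c : Char) (cs : List Char) :
    (cs.dropWhile identCont).length < (c :: cs).length :=
  Nat.lt_succ_of_le (List.length_dropWhile_le _ _)

-- ===== PORT A =====
-- A's Python state strings "code"/"line_comment"/"block_comment"/"string"/"char"
-- are transliterated as this 5-constructor state type; 'i' only moves forward,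
-- so the while-loop is the recursion on the remaining suffix of text.
inductive AState where
  | code | lineComment | blockComment | strLit | charLit
deriving DecidableEq

def loopA : List Char → AState → PySem.Set String → PySem.Set String
  | [], _, ids => ids
  | c :: cs, st, ids =>
    match st with
    | .code =>
      if c = '/' ∧ cs.head? = some '/' then loopA cs.tail .lineComment ids       -- i += 2
      else if c = '/' ∧ cs.head? = some '*' then loopA cs.tail .blockComment ids -- i += 2
      else if c = '"' then loopA cs .strLit ids                                  -- i += 1
      else if c = '\'' then loopA cs .charLit ids                                -- i += 1
      else if identStart c then
        -- inner while over j; text[i:j] = c :: takeWhile; i = j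
        loopA (cs.dropWhile identCont) .code
          (PySem.Set.add ids (String.ofList (c :: cs.takeWhile identCont)))
      else loopA cs .code ids                                                    -- i += 1
    | .lineComment =>
      if c = '\n' then loopA cs .code ids else loopA cs .lineComment ids
    | .blockComment =>
      if c = '*' ∧ cs.head? = some '/' then loopA cs.tail .code ids
      else loopA cs .blockComment ids
    | .strLit =>
      if c = '\\' then loopA cs.tail .strLit ids                                 -- i += 2
      else if c = '"' then loopA cs .code ids
      else loopA cs .strLit ids
    | .charLit =>
      if c = '\\' then loopA cs.tail .charLit ids
      else if c = '\'' then loopA cs .code ids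
      else loopA cs .charLit ids
  termination_by cs _ _ => cs.length
  decreasing_by all_goals first | exact pv_tail_lt _ _ | exact pv_drop_lt _ _ | simp

def collect_identifiers (text : String) : List String :=
  loopA text.toList .code PySem.Set.empty

-- ===== PORT B =====
-- helper _skip_line: drop through the first newline
def skipLineB : List Char → List Char
  | [] => []
  | c :: cs => if c = '\n' then cs else skipLineB cs

-- helper _skip_block: drop through the first '*/'
def skipBlockB : List Char → List Char
  | [] => []
  | c :: cs => if c = '*' ∧ cs.head? = some '/' then cs.tail else skipBlockB cs

-- helper _skip_literal: drop through the closing quote, a backslash escapes the next char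
def skipLitB (q : Char) : List Char → List Char
  | [] => []
  | c :: cs =>
    if c = '\\' then skipLitB q cs.tail
    else if c = q then cs
    else skipLitB q cs
  termination_by cs => cs.length
  decreasing_by all_goals first | exact pv_tail_lt _ _ | simp

-- length bounds scanB's termination cites by name
theorem skipLineB_le (cs : List Char) : (skipLineB cs).length ≤ cs.length := by
  induction cs with
  | nil => simp [skipLineB]
  | cons c cs ih =>
    rw [skipLineB]; split
    · simp
    · simp; omega

theorem skipBlockB_le (cs : List Char) : (skipBlockB cs).length ≤ cs.length := by
  induction cs with
  | nil => simp [skipBlockB]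
  | cons c cs ih =>
    rw [skipBlockB]; split
    · cases cs <;> simp <;> omega
    · simp; omega

theorem skipLitB_le (q : Char) (cs : List Char) : (skipLitB q cs).length ≤ cs.length := by
  fun_induction skipLitB q cs <;> simp_all <;> omega

theorem pv_skipLine_lt (c : Char) (cs : List Char) :
    (skipLineB cs.tail).length < (c :: cs).length :=
  Nat.lt_succ_of_le (Nat.le_trans (skipLineB_le _) (by cases cs <;> simp))
theorem pv_skipBlock_lt (c : Char) (cs : List Char) :
    (skipBlockB cs.tail).length < (c :: cs).length :=
  Nat.lt_succ_of_le (Nat.le_trans (skipBlockB_le _) (by cases cs <;> simp))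
theorem pv_skipLit_lt (c : Char) (cs : List Char) :
    (skipLitB c cs).length < (c :: cs).length :=
  Nat.lt_succ_of_le (skipLitB_le _ _)

def scanB : List Char → PySem.Set String → PySem.Set String
  | [], ids => ids
  | c :: cs, ids =>
    if c = '/' ∧ cs.head? = some '/' then scanB (skipLineB cs.tail) ids
    else if c = '/' ∧ cs.head? = some '*' then scanB (skipBlockB cs.tail) ids
    else if c = '"' ∨ c = '\'' then scanB (skipLitB c cs) ids
    else if identStart c then
      scanB (cs.dropWhile identCont)
        (PySem.Set.add ids (String.ofList (c :: cs.takeWhile identCont)))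
    else scanB cs ids
  termination_by cs _ => cs.length
  decreasing_by all_goals
    first
    | exact pv_skipLine_lt _ _
    | exact pv_skipBlock_lt _ _
    | exact pv_skipLit_lt _ _
    | exact pv_drop_lt _ _
    | simp

def collect_identifiers_alt (text : String) : List String :=
  scanB text.toList PySem.Set.empty

-- ===== PRECONDITION & SPEC =====
def Spec_collect_identifiers (text : String) (out : List String) : Prop := out = collect_identifiers_alt text
instance (text : String) (out : List String) : Decidable (Spec_collect_identifiers text out) := by unfold Spec_collect_identifiers; infer_instance

-- ===== CLAIM (what is proved, stated in full; the proofs are below) =====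
def Claim_equal_collect_identifiers : Prop := ∀ (text : String), Dom_collect_identifiers text → Spec_collect_identifiers text (collect_identifiers text)

-- ===== LEMMAS AND PROOFS =====

-- A in line_comment mode equals A restarted in code mode after B's _skip_line
theorem loopA_lineComment (cs : List Char) (ids : PySem.Set String) :
    loopA cs .lineComment ids = loopA (skipLineB cs) .code ids := by
  induction cs with
  | nil => simp [skipLineB, loopA]
  | cons c cs ih =>
    rw [loopA.eq_def, skipLineB]
    by_cases h : c = '\n' <;> simp [h, ih]

-- A in block_comment mode equals A restarted after B's _skip_block
theorem loopA_blockComment (cs : List Char) (ids : PySem.Set String) :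
    loopA cs .blockComment ids = loopA (skipBlockB cs) .code ids := by
  induction cs with
  | nil => simp [skipBlockB, loopA]
  | cons c cs ih =>
    rw [loopA.eq_def, skipBlockB]
    by_cases h : c = '*' ∧ cs.head? = some '/' <;> simp [h, ih]

-- A in string mode equals A restarted after B's _skip_literal with quote '"'
theorem loopA_strLit (cs : List Char) (ids : PySem.Set String) :
    loopA cs .strLit ids = loopA (skipLitB '"' cs) .code ids := by
  fun_induction skipLitB _ cs with
  | case1 => simp [loopA]
  | case2 cs ih => rw [loopA.eq_def]; simp [ih]
  | case3 cs h => rw [loopA.eq_def]; simp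
  | case4 c cs h hq ih => rw [loopA.eq_def]; simp [h, hq, ih]


-- A in char mode equals A restarted after B's _skip_literal with quote '\''
theorem loopA_charLit (cs : List Char) (ids : PySem.Set String) :
    loopA cs .charLit ids = loopA (skipLitB '\'' cs) .code ids := by
  fun_induction skipLitB _ cs with
  | case1 => simp [loopA]
  | case2 cs ih => rw [loopA.eq_def]; simp [ih]
  | case3 cs h => rw [loopA.eq_def]; simp
  | case4 c cs h hq ih => rw [loopA.eq_def]; simp [h, hq, ih]


-- main loop invariant: A in code mode computes exactly B's scan
theorem loopA_code_eq_scanB (cs : List Char) (ids : PySem.Set String) :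
    loopA cs .code ids = scanB cs ids := by
  fun_induction scanB cs ids with
  | case1 ids => simp [loopA]
  | case2 c cs ids h ih =>
    rw [loopA.eq_def]; simp [h, loopA_lineComment, ih]
  | case3 c cs ids h1 h ih =>
    rw [loopA.eq_def]; simp [h, loopA_blockComment, ih]
  | case4 c cs ids h1 h2 h ih =>
    rcases h with rfl | rfl <;>
      (rw [loopA.eq_def]; simp [loopA_strLit, loopA_charLit, ih])
  | case5 c cs ids h1 h2 h3 h ih =>
    have hc : c ≠ '/' := by rintro rfl; revert h; decide
    push Not at h3
    rw [loopA.eq_def]; simp [hc, h3.1, h3.2, h, ih]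
  | case6 c cs ids h1 h2 h3 h4 ih =>
    push Not at h3
    rw [loopA.eq_def]; simp [h1, h2, h3.1, h3.2, h4, ih]


-- ===== VERDICT (by name: the statement is the Claim_ definition above) =====
theorem collect_identifiers_spec : Claim_equal_collect_identifiers := by
  intro text _
  unfold Spec_collect_identifiers collect_identifiers collect_identifiers_alt
  exact loopA_code_eq_scanB _ _
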